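-- pv_equiv track=rewrite | github.com/TheAxiomFoundation/rac-compile | src/rac_compile/expression_ir.py | _find_top_level_colon
-- ===== SOURCE A (Python) =====
-- def _consume_string_literal(expression: str, start: int) -> tuple[str, int]:
--     """Consume a quoted string literal, preserving escapes."""
--     quote = expression[start]
--     index = start + 1
--     while index < len(expression):
--         char = expression[index]
--         if char == "\\":
--             index += 2
--             continue
--         if char == quote:
--             index += 1
--             return expression[start:index], index
--         index += 1
--     return expression[start:], len(expression)
--
-- def _find_top_level_colon(expression: str, start_index: int = 0) -> int:
--     """Find a top-level ':' after the requested start index."""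
--     depth = 0
--     index = start_index
--     while index < len(expression):
--         char = expression[index]
--         if char in {"'", '"'}:
--             _, index = _consume_string_literal(expression, index)
--             continue
--         if char in "([{":
--             depth += 1
--         elif char in ")]}":
--             depth -= 1
--         elif char == ":" and depth == 0:
--             return index
--         index += 1
--     return -1
-- ===== SOURCE B (Python) =====
-- def _find_top_level_colon(expression: str, start_index: int = 0) -> int:
--     """Find a top-level ':' after the requested start index."""
--     depth = 0
--     in_string = None
--     escape = False
--     index = start_index
--     while index < len(expression):
--         char = expression[index]
--         if escape:
--             escape = False
--         elif in_string is not None: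
--             if char == "\\":
--                 escape = True
--             elif char == in_string:
--                 in_string = None
--         elif char in "'\"":
--             in_string = char
--         elif char in "([{":
--             depth += 1
--         elif char in ")]}":
--             depth -= 1
--         elif char == ":" and depth == 0:
--             return index
--         index += 1
--     return -1
-- ===== Notes on version B (the rewrite author's own statement) =====
-- stated objective: simpler
-- what changed: Replaced the string-consuming helper function (an inner while loop that jumps the index past a whole quoted literal) by a single flat per-character state machine with in_string/escape flags, advancing the index by exactly one per iteration.
import Mathlib
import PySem

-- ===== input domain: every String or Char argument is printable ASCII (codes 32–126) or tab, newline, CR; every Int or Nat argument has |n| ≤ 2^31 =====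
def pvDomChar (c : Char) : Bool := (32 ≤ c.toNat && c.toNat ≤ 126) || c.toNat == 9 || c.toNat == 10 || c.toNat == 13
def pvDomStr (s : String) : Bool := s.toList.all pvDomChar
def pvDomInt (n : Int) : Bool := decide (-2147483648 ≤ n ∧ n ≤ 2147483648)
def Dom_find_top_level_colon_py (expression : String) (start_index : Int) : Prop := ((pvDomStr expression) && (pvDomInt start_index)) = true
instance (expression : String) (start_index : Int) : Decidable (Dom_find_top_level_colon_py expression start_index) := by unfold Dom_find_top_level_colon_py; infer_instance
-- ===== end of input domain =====

-- B replaces A's string-consuming helper by a single flat per-character state machine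
-- (in_string/escape flags, index advances by one each step); objective: simpler. Same O(n) cost.
-- Both loops carry a Nat fuel that only makes the recursion structural; it is always supplied
-- large enough (one unit per loop iteration, index advances by ≥ 1) so no fuel-exhaustion
-- branch is ever taken on the stated fuel.

-- ===== PORT A =====
-- the while loop of _consume_string_literal (returns the slice and the new index);
-- fuel 0 returns the loop-exit value (unreachable: each iteration advances index by ≥ 1)
def pvConsumeLoop (e : List Char) (q : Char) (s : Int) : Nat → Int → String × Int
  | 0, _ => (String.ofList (PySem.List.slice e (some s) none), (e.length : Int))
  | fuel + 1, index =>
    if index < (e.length : Int) then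
      match PySem.List.pyGet? e index with
      | none => (String.ofList [], (e.length : Int))   -- unreachable: -len ≤ index < len inside Pre_
      | some c =>
        if c = '\\' then pvConsumeLoop e q s fuel (index + 2)
        else if c = q then (String.ofList (PySem.List.slice e (some s) (some (index + 1))), index + 1)
        else pvConsumeLoop e q s fuel (index + 1)
    else (String.ofList (PySem.List.slice e (some s) none), (e.length : Int))

-- _consume_string_literal: expression[start] raises IndexError when out of range (outside Pre_)
def pvConsume (e : List Char) (fuel : Nat) (s : Int) : String × Int :=
  match PySem.List.pyGet? e s with
  | none => (String.ofList [], (e.length : Int))   -- IndexError in Python; junk value, excluded by Pre_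
  | some q => pvConsumeLoop e q s fuel (s + 1)

-- the main while loop of _find_top_level_colon; fuel 0 returns the loop-exit value -1
def pvFindLoop (e : List Char) : Nat → Int → Int → Int
  | 0, _, _ => -1
  | fuel + 1, depth, index =>
    if index < (e.length : Int) then
      match PySem.List.pyGet? e index with
      | none => -2   -- IndexError in Python; junk value, excluded by Pre_
      | some c =>
        if c = '\'' ∨ c = '"' then pvFindLoop e fuel depth (pvConsume e fuel index).2
        else if c = '(' ∨ c = '[' ∨ c = '{' then pvFindLoop e fuel (depth + 1) (index + 1)
        else if c = ')' ∨ c = ']' ∨ c = '}' then pvFindLoop e fuel (depth - 1) (index + 1)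
        else if c = ':' ∧ depth = 0 then index
        else pvFindLoop e fuel depth (index + 1)
    else -1

def find_top_level_colon_py (expression : String) (start_index : Int) : Int :=
  pvFindLoop expression.toList (((expression.toList.length : Int) - start_index).toNat)
    0 start_index

-- ===== PORT B =====
-- single flat loop: state = (index, in_string, escape, depth); fuel 0 = loop exit (unreachable)
def pvAltLoop (e : List Char) : Nat → Int → Option Char → Bool → Int → Int
  | 0, _, _, _, _ => -1
  | fuel + 1, index, inString, escape, depth =>
    if index < (e.length : Int) then
      match PySem.List.pyGet? e index with
      | none => -2   -- IndexError in Python; junk value, excluded by Pre_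
      | some c =>
        if escape then pvAltLoop e fuel (index + 1) inString false depth
        else
          match inString with
          | some q =>
            if c = '\\' then pvAltLoop e fuel (index + 1) (some q) true depth
            else if c = q then pvAltLoop e fuel (index + 1) none false depth
            else pvAltLoop e fuel (index + 1) (some q) false depth
          | none =>
            if c = '\'' ∨ c = '"' then pvAltLoop e fuel (index + 1) (some c) false depth
            else if c = '(' ∨ c = '[' ∨ c = '{' then pvAltLoop e fuel (index + 1) none false (depth + 1)
            else if c = ')' ∨ c = ']' ∨ c = '}' then pvAltLoop e fuel (index + 1) none false (depth - 1)
            else if c = ':' ∧ depth = 0 then index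
            else pvAltLoop e fuel (index + 1) none false depth
    else -1

def find_top_level_colon_py_alt (expression : String) (start_index : Int) : Int :=
  pvAltLoop expression.toList (((expression.toList.length : Int) - start_index).toNat)
    start_index none false 0

-- ===== PRECONDITION & SPEC =====
-- Pre_ excludes exactly the inputs where Python A raises IndexError: a start index below
-- -len(expression) (Python's negative indexing then falls off the string); B raises there too.
def Pre_find_top_level_colon_py (expression : String) (start_index : Int) : Prop :=
  -(expression.toList.length : Int) ≤ start_index
instance (expression : String) (start_index : Int) : Decidable (Pre_find_top_level_colon_py expression start_index) := by unfold Pre_find_top_level_colon_py; infer_instance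

def pvWitness_find_top_level_colon_py : String × Int := ("a:b", 0)

def Spec_find_top_level_colon_py (expression : String) (start_index : Int) (out : Int) : Prop := out = find_top_level_colon_py_alt expression start_index
instance (expression : String) (start_index : Int) (out : Int) : Decidable (Spec_find_top_level_colon_py expression start_index out) := by unfold Spec_find_top_level_colon_py; infer_instance

-- ===== CLAIM (what is proved, stated in full; the proofs are below) =====
def Claim_equal_find_top_level_colon_py : Prop := ∀ (expression : String) (start_index : Int), Dom_find_top_level_colon_py expression start_index → Pre_find_top_level_colon_py expression start_index → Spec_find_top_level_colon_py expression start_index (find_top_level_colon_py expression start_index)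

-- ===== LEMMAS AND PROOFS =====

lemma pvGetSome (e : List Char) (i : Int) (hlo : -(e.length : Int) ≤ i) (hhi : i < (e.length : Int)) :
    ∃ c, PySem.List.pyGet? e i = some c := by
  cases h : PySem.List.pyGet? e i with
  | none =>
    rw [PySem.List.pyGet?_eq_none_iff] at h
    exact absurd ⟨hlo, hhi⟩ h
  | some c => exact ⟨c, rfl⟩

-- with any fuel, both loops return -1 once the index has reached the end
lemma pvFindLoop_ge (e : List Char) (fuel : Nat) (depth index : Int)
    (h : ¬ index < (e.length : Int)) : pvFindLoop e fuel depth index = -1 := by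
  cases fuel with
  | zero => rfl
  | succ fuel => rw [pvFindLoop]; simp [h]

lemma pvAltLoop_ge (e : List Char) (fuel : Nat) (index : Int) (inString : Option Char)
    (escape : Bool) (depth : Int) (h : ¬ index < (e.length : Int)) :
    pvAltLoop e fuel index inString escape depth = -1 := by
  cases fuel with
  | zero => rfl
  | succ fuel => rw [pvAltLoop]; simp [h]

-- the combined simulation, by strong induction on the number of characters left:
-- A's main loop vs B in the top-level state, and A's consume loop (followed by the rest of
-- A's main loop) vs B in the in-string state; each fuel only needs to cover the characters left
lemma pvSim (e : List Char) : ∀ n : Nat,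
    (∀ fa fb depth index, ((e.length : Int) - index).toNat ≤ n →
       ((e.length : Int) - index).toNat ≤ fa → ((e.length : Int) - index).toNat ≤ fb →
       -(e.length : Int) ≤ index →
       pvFindLoop e fa depth index = pvAltLoop e fb index none false depth)
  ∧ (∀ fc fa fb depth q s index, ((e.length : Int) - index).toNat ≤ n →
       ((e.length : Int) - index).toNat ≤ fc → ((e.length : Int) - index).toNat ≤ fa + 1 →
       ((e.length : Int) - index).toNat ≤ fb →
       -(e.length : Int) < index →
       pvFindLoop e fa depth (pvConsumeLoop e q s fc index).2 = pvAltLoop e fb index (some q) false depth) := by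
  intro n
  induction n with
  | zero =>
    constructor
    · intro fa fb depth index hm _ _ _
      have h : ¬ index < (e.length : Int) := by omega
      rw [pvFindLoop_ge e fa depth index h, pvAltLoop_ge e fb index none false depth h]
    · intro fc fa fb depth q s index hm _ _ _ _
      have h : ¬ index < (e.length : Int) := by omega
      have h2 : (pvConsumeLoop e q s fc index).2 = (e.length : Int) := by
        cases fc with
        | zero => rfl
        | succ fc => rw [pvConsumeLoop]; simp [h]
      rw [h2, pvFindLoop_ge e fa depth _ (by omega), pvAltLoop_ge e fb index (some q) false depth h]
  | succ n ih =>
    constructor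
    · -- main loop simulation
      intro fa fb depth index hm hfa hfb hlo
      by_cases hlt : index < (e.length : Int)
      · obtain ⟨c, hc⟩ := pvGetSome e index hlo hlt
        obtain ⟨fa', rfl⟩ : ∃ fa', fa = fa' + 1 := ⟨fa - 1, by omega⟩
        obtain ⟨fb', rfl⟩ : ∃ fb', fb = fb' + 1 := ⟨fb - 1, by omega⟩
        rw [pvFindLoop, pvAltLoop]
        simp only [hlt, if_true, hc, Bool.false_eq_true, if_false]
        by_cases hq : c = '\'' ∨ c = '"'
        · simp only [hq, if_true]
          unfold pvConsume
          rw [hc]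
          exact ih.2 fa' fa' fb' depth c index (index + 1) (by omega) (by omega) (by omega)
            (by omega) (by omega)
        · simp only [hq, if_false]
          by_cases hob : c = '(' ∨ c = '[' ∨ c = '{'
          · simp only [hob, if_true]
            exact ih.1 fa' fb' (depth + 1) (index + 1) (by omega) (by omega) (by omega) (by omega)
          · simp only [hob, if_false]
            by_cases hcb : c = ')' ∨ c = ']' ∨ c = '}'
            · simp only [hcb, if_true]
              exact ih.1 fa' fb' (depth - 1) (index + 1) (by omega) (by omega) (by omega) (by omega)
            · simp only [hcb, if_false]
              by_cases hcol : c = ':' ∧ depth = 0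
              · simp [hcol]
              · simp only [hcol, if_false]
                exact ih.1 fa' fb' depth (index + 1) (by omega) (by omega) (by omega) (by omega)
      · rw [pvFindLoop_ge e fa depth index hlt, pvAltLoop_ge e fb index none false depth hlt]
    · -- consume loop simulation
      intro fc fa fb depth q s index hm hfc hfa hfb hlo
      by_cases hlt : index < (e.length : Int)
      · obtain ⟨c, hc⟩ := pvGetSome e index (by omega) hlt
        obtain ⟨fc', rfl⟩ : ∃ fc', fc = fc' + 1 := ⟨fc - 1, by omega⟩
        obtain ⟨fb', rfl⟩ : ∃ fb', fb = fb' + 1 := ⟨fb - 1, by omega⟩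
        rw [pvConsumeLoop, pvAltLoop]
        simp only [hlt, if_true, hc, Bool.false_eq_true, if_false]
        by_cases hbs : c = '\\'
        · simp only [hbs, if_true]
          -- A jumps to index + 2; B enters the escape state at index + 1
          by_cases h2 : index + 1 < (e.length : Int)
          · obtain ⟨c', hc'⟩ := pvGetSome e (index + 1) (by omega) h2
            obtain ⟨fb'', rfl⟩ : ∃ fb'', fb' = fb'' + 1 := ⟨fb' - 1, by omega⟩
            rw [pvAltLoop]
            simp only [h2, if_true, hc', if_true]
            rw [show index + 1 + 1 = index + 2 by ring]
            exact ih.2 fc' fa fb'' depth q s (index + 2) (by omega) (by omega) (by omega)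
              (by omega) (by omega)
          · rw [pvAltLoop_ge e fb' (index + 1) (some q) true depth h2]
            have h3 : (pvConsumeLoop e q s fc' (index + 2)).2 = (e.length : Int) := by
              cases fc' with
              | zero => rfl
              | succ fc'' => rw [pvConsumeLoop]; simp [show ¬ index + 2 < (e.length : Int) by omega]
            rw [h3]
            exact pvFindLoop_ge e fa depth _ (by omega)
        · simp only [hbs, if_false]
          by_cases hcq : c = q
          · simp only [hcq, if_true]
            exact ih.1 fa fb' depth (index + 1) (by omega) (by omega) (by omega) (by omega)
          · simp only [hcq, if_false]
            exact ih.2 fc' fa fb' depth q s (index + 1) (by omega) (by omega) (by omega)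
              (by omega) (by omega)
      · have h2 : (pvConsumeLoop e q s fc index).2 = (e.length : Int) := by
          cases fc with
          | zero => rfl
          | succ fc' => rw [pvConsumeLoop]; simp [hlt]
        rw [h2, pvFindLoop_ge e fa depth _ (by omega),
          pvAltLoop_ge e fb index (some q) false depth hlt]

-- ===== VERDICT (by name: the statement is the Claim_ definition above) =====
theorem find_top_level_colon_py_spec : Claim_equal_find_top_level_colon_py := by
  intro expression start_index _ hpre
  unfold Spec_find_top_level_colon_py find_top_level_colon_py find_top_level_colon_py_alt
  exact (pvSim expression.toList (((expression.toList.length : Int) - start_index).toNat)).1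
    _ _ 0 start_index (le_refl _) (le_refl _) (le_refl _) hpre
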